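-- pv_equiv track=rewrite | github.com/Dongxu-H/KernelGen | optimization_analysis/v3/unsqueeze.py | _find_contiguous_tail
-- ===== SOURCE A (Python) =====
-- def _find_contiguous_tail(shape, strides):
--     """
--     Find largest contiguous tail (in physical memory) of input tensor.
--     Returns (tail_start_index, N), where N = product of tail shapes.
--     Contiguity criterion: strides[i] == expected, with expected starting at 1 and
--     multiplying by shape as we move left.
--     Size-1 dims do not enlarge contiguous region unless their stride matches expected
--     (but they don't change N anyway).
--     """
--     expected = 1
--     N = 1
--     tail_start = len(shape)  # default: empty tail
--     for i in range(len(shape) - 1, -1, -1):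
--         # Skip size-1 dims that don't break contiguity but don't enlarge N
--         if shape[i] == 1:
--             # If stride matches expected, we can treat as part of contiguous chain,
--             # but N doesn't grow (shape==1). Either way, safe to continue.
--             if strides[i] == expected:
--                 tail_start = i
--             # Even if it doesn't match, size-1 dims don't contribute; we break if it mismatches.
--             else:
--                 break
--             continue
--         if strides[i] == expected:
--             tail_start = i
--             expected *= shape[i]
--             N *= shape[i]
--         else:
--             break
--     return tail_start, N
-- ===== SOURCE B (Python) =====
-- def _find_contiguous_tail(shape, strides):
--     n = len(shape)
--     # suffix products: expect[i] = product of shape[i:]; expect[n] = 1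
--     expect = [1] * (n + 1)
--     for i in range(n - 1, -1, -1):
--         expect[i] = shape[i] * expect[i + 1]
--     tail_start = n
--     while tail_start > 0 and strides[tail_start - 1] == expect[tail_start]:
--         tail_start -= 1
--     return tail_start, expect[tail_start]
-- ===== Notes on version B (the rewrite author's own statement) =====
-- stated objective: alternative
-- what changed: A's single stateful right-to-left loop carrying expected/N/tail_start with a special size-1 branch is replaced by two plain phases: a suffix-product table of the shape (the expected stride at each position, into which size-1 dims fold as factor 1, so the special branch disappears) and a simple while-scan from the right that stops at the first stride/table mismatch; the result is read off as (tail_start, table[tail_start]).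
import Mathlib
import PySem

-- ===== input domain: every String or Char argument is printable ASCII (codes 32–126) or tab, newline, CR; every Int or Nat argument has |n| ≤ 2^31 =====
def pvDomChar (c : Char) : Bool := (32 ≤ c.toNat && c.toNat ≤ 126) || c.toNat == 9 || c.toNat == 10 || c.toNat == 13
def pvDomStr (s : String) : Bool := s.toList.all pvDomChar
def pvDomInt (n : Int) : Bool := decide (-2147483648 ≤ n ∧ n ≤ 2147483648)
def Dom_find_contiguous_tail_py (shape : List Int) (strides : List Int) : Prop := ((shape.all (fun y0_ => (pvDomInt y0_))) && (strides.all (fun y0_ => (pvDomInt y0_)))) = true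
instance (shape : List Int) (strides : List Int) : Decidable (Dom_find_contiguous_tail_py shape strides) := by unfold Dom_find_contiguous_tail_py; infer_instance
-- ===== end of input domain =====

-- B replaces A's stateful right-to-left loop (expected/N/tail_start with a size-1 branch) by a
-- suffix-product table plus a plain while-scan; alternative decomposition, no speed claim.

-- ===== PORT A =====
-- A's loop `for i in range(len(shape)-1,-1,-1)` with `break`, as structural recursion on the
-- remaining count k (processing index k-1); state (expected, N, tail_start) exactly as in A.
def findTailLoopA (shape strides : List Int) : Nat → Int → Int → Int → Int × Int
  | 0, _expected, n, ts => (ts, n)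
  | (k+1), expected, n, ts =>
    let sh := PySem.List.pyGetD shape (k : Int) 0
    let st := PySem.List.pyGetD strides (k : Int) 0
    if sh = 1 then
      if st = expected then findTailLoopA shape strides k expected n (k : Int)
      else (ts, n)  -- break
    else
      if st = expected then findTailLoopA shape strides k (expected * sh) (n * sh) (k : Int)
      else (ts, n)  -- break

def find_contiguous_tail_py (shape : List Int) (strides : List Int) : Int × Int :=
  findTailLoopA shape strides shape.length 1 1 (shape.length : Int)

-- ===== PORT B =====
-- suffix products of Source B: expect has length n+1, expect[i] = shape[i] * expect[i+1], expect[n] = 1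
def suffixProds : List Int → List Int
  | [] => [1]
  | x :: xs =>
    let r := suffixProds xs
    (x * r.getD 0 1) :: r

-- Source B's `while tail_start > 0 and strides[tail_start-1] == expect[tail_start]: tail_start -= 1`
def findTailLoopB (strides expect : List Int) : Nat → Nat
  | 0 => 0
  | (t+1) => if strides.getD t 0 = expect.getD (t+1) 1 then findTailLoopB strides expect t else t+1

def find_contiguous_tail_py_alt (shape : List Int) (strides : List Int) : Int × Int :=
  (((findTailLoopB strides (suffixProds shape) shape.length : Nat) : Int),
   (suffixProds shape).getD (findTailLoopB strides (suffixProds shape) shape.length) 1)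

-- ===== PRECONDITION & SPEC =====
-- A raises IndexError (strides[len(shape)-1]) as soon as strides is shorter than shape; both
-- ports' totalised indexing is only claimed where Python returns.
def Pre_find_contiguous_tail_py (shape : List Int) (strides : List Int) : Prop :=
  shape.length ≤ strides.length
instance (shape : List Int) (strides : List Int) : Decidable (Pre_find_contiguous_tail_py shape strides) := by unfold Pre_find_contiguous_tail_py; infer_instance

def pvWitness_find_contiguous_tail_py : List Int × List Int := ([2, 3], [3, 1])

def Spec_find_contiguous_tail_py (shape : List Int) (strides : List Int) (out : Int × Int) : Prop := out = find_contiguous_tail_py_alt shape strides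
instance (shape : List Int) (strides : List Int) (out : Int × Int) : Decidable (Spec_find_contiguous_tail_py shape strides out) := by unfold Spec_find_contiguous_tail_py; infer_instance

-- ===== CLAIM (what is proved, stated in full; the proofs are below) =====
def Claim_equal_find_contiguous_tail_py : Prop := ∀ (shape : List Int) (strides : List Int), Dom_find_contiguous_tail_py shape strides → Pre_find_contiguous_tail_py shape strides → Spec_find_contiguous_tail_py shape strides (find_contiguous_tail_py shape strides)

-- ===== LEMMAS AND PROOFS =====

theorem suffixProds_getD (shape : List Int) :
    ∀ k, k ≤ shape.length → (suffixProds shape).getD k 1 = (shape.drop k).prod := by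
  induction shape with
  | nil =>
    intro k hk
    have hk0 : k = 0 := Nat.le_zero.mp hk
    subst hk0
    simp [suffixProds]
  | cons x xs ih =>
    intro k hk
    cases k with
    | zero =>
      have hh : (suffixProds xs).getD 0 1 = xs.prod := ih 0 (Nat.zero_le _)
      rw [List.drop_zero, List.prod_cons]
      show x * (suffixProds xs).getD 0 1 = x * xs.prod
      rw [hh]
    | succ k =>
      have := ih k (by simpa using hk)
      simpa [suffixProds] using this

theorem findTailLoopB_le (strides expect : List Int) :
    ∀ k, findTailLoopB strides expect k ≤ k := by
  intro k
  induction k with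
  | zero => simp [findTailLoopB]
  | succ t ih =>
    unfold findTailLoopB
    split
    · exact Nat.le_succ_of_le ih
    · exact Nat.le_refl _

theorem loops_agree (shape strides : List Int) (h : shape.length ≤ strides.length) :
    ∀ k, k ≤ shape.length →
      findTailLoopA shape strides k ((shape.drop k).prod) ((shape.drop k).prod) (k : Int)
        = ((findTailLoopB strides (suffixProds shape) k : Int),
           (shape.drop (findTailLoopB strides (suffixProds shape) k)).prod) := by
  intro k
  induction k with
  | zero => intro _; simp [findTailLoopA, findTailLoopB]
  | succ k ih =>
    intro hk
    have hkn : k < shape.length := hk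
    have hks : k < strides.length := lt_of_lt_of_le hkn h
    have hsh : PySem.List.pyGetD shape (k : Int) 0 = shape[k] := by
      rw [PySem.List.pyGetD_natCast]; exact List.getD_eq_getElem shape 0 hkn
    have hst : PySem.List.pyGetD strides (k : Int) 0 = strides[k] := by
      rw [PySem.List.pyGetD_natCast]; exact List.getD_eq_getElem strides 0 hks
    have hstD : strides.getD k 0 = strides[k] := List.getD_eq_getElem strides 0 hks
    have hexp : (suffixProds shape).getD (k+1) 1 = (shape.drop (k+1)).prod :=
      suffixProds_getD shape (k+1) hk
    have hdrop : shape.drop k = shape[k] :: shape.drop (k+1) :=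
      List.drop_eq_getElem_cons hkn
    have hprod : (shape.drop k).prod = shape[k] * (shape.drop (k+1)).prod := by
      rw [hdrop, List.prod_cons]
    simp only [findTailLoopA, findTailLoopB]
    rw [hsh, hst, hstD, hexp]
    by_cases hm : strides[k] = (List.drop (k + 1) shape).prod
    · simp only [if_pos hm]
      by_cases h1 : shape[k] = (1 : Int)
      · rw [if_pos h1]
        have hPk : (shape.drop k).prod = (shape.drop (k+1)).prod := by
          rw [hprod, h1, one_mul]
        have := ih (Nat.le_of_lt hkn)
        rw [hPk] at this
        exact this
      · rw [if_neg h1]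
        have hPk : (shape.drop (k+1)).prod * shape[k] = (shape.drop k).prod := by
          rw [hprod]; ring
        have := ih (Nat.le_of_lt hkn)
        rw [← hPk] at this
        exact this
    · simp only [if_neg hm]
      by_cases h1 : shape[k] = (1 : Int)
      · rw [if_pos h1]
      · rw [if_neg h1]

-- ===== VERDICT (by name: the statement is the Claim_ definition above) =====
theorem find_contiguous_tail_py_spec : Claim_equal_find_contiguous_tail_py := by
  intro shape strides _hdom hpre
  unfold Spec_find_contiguous_tail_py find_contiguous_tail_py find_contiguous_tail_py_alt
  have h := loops_agree shape strides hpre shape.length (Nat.le_refl _)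
  simp only [List.drop_length, List.prod_nil] at h
  rw [h]
  have hle := findTailLoopB_le strides (suffixProds shape) shape.length
  rw [suffixProds_getD shape _ hle]
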